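-- pv_equiv track=rewrite | github.com/rocktronica/flippp | build_html.py | panelize
-- ===== SOURCE A (Python) =====
-- import math
--
-- def get_page_count(panel_count, panels_per_page):
--     return math.ceil(panel_count / panels_per_page)
--
-- def get_page_index(i, panels_per_page):
--     return math.floor(i / panels_per_page)
--
-- def panelize(input, panels_per_page):
--     output = []
--     page_count = get_page_count(len(input), panels_per_page)
--
--     for i in range(page_count * panels_per_page):
--         page_index = get_page_index(i, panels_per_page)
--         panel_index = i % panels_per_page
--         input_index = panel_index * page_count + page_index
--
--         appendee = input[input_index] if input_index <= len(input) - 1 else None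
--
--         output.append(appendee)
--
--     return output
-- ===== SOURCE B (Python) =====
-- import math
--
--
-- def panelize(input, panels_per_page):
--     page_count = math.ceil(len(input) / panels_per_page)
--     padded = list(input) + [None] * (page_count * panels_per_page - len(input))
--     rows = [padded[p * page_count:(p + 1) * page_count]
--             for p in range(panels_per_page)]
--     return [row[page] for page in range(page_count) for row in rows]
-- ===== Notes on version B (the rewrite author's own statement) =====
-- stated objective: idiomatic
-- what changed: B replaces A's per-index ceil/floor/mod arithmetic with a data-structure formulation: pad the input with None to a full page_count*panels_per_page grid, slice it into panels_per_page rows of width page_count, and flatten the grid column-major; no index arithmetic or bounds test per element.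
-- outside the precondition, e.g. on panelize(['a', 'b', 'c'], -2): A returns ['a', 'a'], B returns []
import Mathlib
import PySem

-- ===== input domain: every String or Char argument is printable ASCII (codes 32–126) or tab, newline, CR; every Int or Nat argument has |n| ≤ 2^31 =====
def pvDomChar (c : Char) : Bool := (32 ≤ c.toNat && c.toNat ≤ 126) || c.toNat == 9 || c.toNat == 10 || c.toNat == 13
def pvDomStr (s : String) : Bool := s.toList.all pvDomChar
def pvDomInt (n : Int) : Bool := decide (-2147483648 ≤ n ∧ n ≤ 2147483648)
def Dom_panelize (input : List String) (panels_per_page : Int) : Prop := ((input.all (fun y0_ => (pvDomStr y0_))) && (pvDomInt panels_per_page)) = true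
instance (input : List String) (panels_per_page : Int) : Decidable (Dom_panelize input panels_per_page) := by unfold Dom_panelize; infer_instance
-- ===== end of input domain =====

-- B builds the padded page_count×panels_per_page grid and flattens it column-major,
-- replacing A's per-index ceil/floor/mod arithmetic (objective: idiomatic).


-- ===== PORT A =====
-- math.ceil(panel_count / panels_per_page): the exact integer ceiling -((-a) // b);
-- float true division followed by ceil is exact on Dom (|ints| ≤ 2^31, list lengths small).
def get_page_count (panel_count panels_per_page : Int) : Int :=
  -(PySem.Int.floordiv (-panel_count) panels_per_page)

-- math.floor(i / panels_per_page): exact integer floor division on Dom.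
def get_page_index (i panels_per_page : Int) : Int :=
  PySem.Int.floordiv i panels_per_page

def panelize (input : List String) (panels_per_page : Int) : List (Option String) :=
  let page_count := get_page_count (input.length : Int) panels_per_page
  (PySem.List.pyRange 0 (page_count * panels_per_page)).foldl
    (fun output i =>
      let page_index := get_page_index i panels_per_page
      let panel_index := PySem.Int.mod i panels_per_page
      let input_index := panel_index * page_count + page_index
      let appendee := if input_index ≤ (input.length : Int) - 1
                      then PySem.List.pyGet? input input_index else none
      output ++ [appendee]) []

-- ===== PORT B =====
def panelize_alt (input : List String) (panels_per_page : Int) : List (Option String) :=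
  let page_count := -(PySem.Int.floordiv (-(input.length : Int)) panels_per_page)  -- math.ceil
  let padded : List (Option String) :=
    input.map some ++ List.replicate (page_count * panels_per_page - input.length).toNat none
  let rows := (PySem.List.pyRange 0 panels_per_page).map
    (fun p => PySem.List.slice padded (some (p * page_count)) (some ((p + 1) * page_count)))
  (PySem.List.pyRange 0 page_count).flatMap
    (fun page => rows.map (fun row => (PySem.List.pyGet? row page).join))
    -- row[page]: always in range under Pre_; .join collapses the Option of pyGet?

-- ===== PRECONDITION & SPEC =====
-- Pre_ restricts to the function's natural domain: at panels_per_page = 0 A raises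
-- ZeroDivisionError, and for negative panels_per_page with a nonempty input A's returned
-- values are accidents of Python's negative-index wraparound (e.g. ['a','b','c'], -2 ↦
-- ['a','a']), outside the layout's meaningful inputs; B returns [] there. (Inputs where
-- page_count = 0 — empty input with nonzero panels_per_page, or negative panels_per_page
-- shorter than the input — stay inside: both return [].)
def Pre_panelize (input : List String) (panels_per_page : Int) : Prop :=
  1 ≤ panels_per_page ∨ (input = [] ∧ panels_per_page ≠ 0) ∨
    (panels_per_page ≤ -1 ∧ (input.length : Int) < -panels_per_page)
instance (input : List String) (panels_per_page : Int) : Decidable (Pre_panelize input panels_per_page) := by unfold Pre_panelize; infer_instance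

def pvWitness_panelize : List String × Int := (["a", "b", "c"], 2)

def Spec_panelize (input : List String) (panels_per_page : Int) (out : List (Option String)) : Prop := out = panelize_alt input panels_per_page
instance (input : List String) (panels_per_page : Int) (out : List (Option String)) : Decidable (Spec_panelize input panels_per_page out) := by unfold Spec_panelize; infer_instance

-- ===== CLAIM (what is proved, stated in full; the proofs are below) =====
def Claim_equal_panelize : Prop := ∀ (input : List String) (panels_per_page : Int), Dom_panelize input panels_per_page → Pre_panelize input panels_per_page → Spec_panelize input panels_per_page (panelize input panels_per_page)

-- ===== LEMMAS AND PROOFS =====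

-- range over a product, split into pages: the column-major re-indexing both programs share
theorem range_mul_map {α : Type} (a b : Nat) (f : Nat → α) :
    (List.range (a * b)).map f
      = (List.range a).flatMap (fun i => (List.range b).map (fun j => f (i * b + j))) := by
  induction a with
  | zero => simp
  | succ a ih =>
      rw [Nat.succ_mul, List.range_add, List.map_append, ih, List.range_succ,
        List.flatMap_append]
      simp [List.map_map, Function.comp]

-- the padded grid read at idx < a (total size), with n = input length
theorem padded_getElem? {α : Type} (input : List α) (a idx : Nat) (hidx : idx < a) :
    (input.map some ++ List.replicate (a - input.length) (none : Option α))[idx]?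
      = some (if h : idx < input.length then some input[idx] else none) := by
  by_cases h : idx < input.length
  · rw [List.getElem?_append_left (by simpa using h)]
    simp [h]
  · rw [List.getElem?_append_right (by simpa using Nat.le_of_not_lt h)]
    simp only [List.length_map]
    rw [List.getElem?_replicate]
    simp [h]
    omega

theorem panelize_spec : Claim_equal_panelize := by
  intro input ppp _ hpre
  unfold Pre_panelize at hpre
  rcases hpre with hpre | ⟨hempty, hppp⟩ | ⟨hneg, hshort⟩
  case inr.inl =>
    subst hempty
    unfold Spec_panelize panelize panelize_alt get_page_count get_page_index
    simp [PySem.Int.floordiv, PySem.List.pyRange]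
  case inr.inr =>
    -- page_count = 0: -input.length lies in (panels_per_page, 0], so the floor quotient is 0
    have hpc : -(PySem.Int.floordiv (-((input.length : Nat) : Int)) ppp) = 0 := by
      have h1 : PySem.Int.floordiv (-((input.length : Nat) : Int)) ppp
          = PySem.Int.floordiv ((input.length : Nat) : Int) (-ppp) := by
        rw [← PySem.Int.floordiv_neg_neg ((input.length : Nat) : Int) (-ppp), neg_neg]
      have h0 : PySem.Int.floordiv ((input.length : Nat) : Int) (-ppp) = 0 := by
        rw [PySem.Int.floordiv_eq_iff_of_pos (by omega)]
        constructor <;> omega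
      rw [h1, h0, neg_zero]
    unfold Spec_panelize panelize panelize_alt get_page_count get_page_index
    rw [hpc]
    simp [PySem.List.pyRange]
  unfold Spec_panelize panelize panelize_alt get_page_count get_page_index
  simp only []
  set n : Nat := input.length
  set pc : Int := -(PySem.Int.floordiv (-(n : Int)) ppp) with hpc
  have hppp0 : 0 < ppp := by omega
  have hbounds : (pc - 1) * ppp < (n : Int) ∧ (n : Int) ≤ pc * ppp :=
    (PySem.Int.neg_floordiv_neg_eq_iff_of_pos hppp0).mp hpc.symm
  have hpc0 : 0 ≤ pc := by nlinarith [hbounds.1, hbounds.2, Int.natCast_nonneg n]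
  -- Nat versions of the two sizes
  obtain ⟨pcN, hpcN⟩ : ∃ m : Nat, pc = (m : Int) := ⟨pc.toNat, (Int.toNat_of_nonneg hpc0).symm⟩
  obtain ⟨pppN, hpppN⟩ : ∃ m : Nat, ppp = (m : Int) := ⟨ppp.toNat, (Int.toNat_of_nonneg (by omega)).symm⟩
  have hpppN1 : 1 ≤ pppN := by omega
  have hnle : n ≤ pcN * pppN := by
    have := hbounds.2
    rw [hpcN, hpppN] at this
    exact_mod_cast this
  -- the padded grid
  set padded : List (Option String) :=
    input.map some ++ List.replicate (pc * ppp - (n : Int)).toNat none with hpadded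
  have hpadtoNat : (pc * ppp - (n : Int)).toNat = pcN * pppN - n := by
    rw [hpcN, hpppN]; omega
  -- A as a map over range
  rw [PySem.List.foldl_append_singleton_eq_map]
  have hmulcast : pc * ppp = ((pcN * pppN : Nat) : Int) := by rw [hpcN, hpppN]; push_cast; ring
  rw [hmulcast, PySem.List.pyRange_zero_natCast, List.map_map]
  -- B: outer/inner ranges as maps over Nat ranges
  rw [hpcN, hpppN, PySem.List.pyRange_zero_natCast, PySem.List.pyRange_zero_natCast,
    List.map_map, List.flatMap_map]
  -- split A's range(pcN*pppN) into pcN pages of pppN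
  rw [range_mul_map pcN pppN]
  -- pagewise equality
  apply List.flatMap_congr
  intro page hpage
  rw [List.mem_range] at hpage
  rw [List.map_map]
  apply List.map_congr_left
  intro p hp
  rw [List.mem_range] at hp
  simp only [Function.comp_apply]
  -- index arithmetic for i = page*pppN + p
  have hmod : PySem.Int.mod ((page * pppN + p : Nat) : Int) ((pppN : Nat) : Int) = (p : Int) := by
    rw [PySem.Int.mod_natCast, Nat.add_comm, Nat.add_mul_mod_self_right, Nat.mod_eq_of_lt hp]
  have hdiv : PySem.Int.floordiv ((page * pppN + p : Nat) : Int) ((pppN : Nat) : Int) = (page : Int) := by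
    rw [PySem.Int.floordiv_natCast, Nat.add_comm, Nat.add_mul_div_right _ _ (by omega : 0 < pppN), Nat.div_eq_of_lt hp, Nat.zero_add]
  have hidx : p * pcN + page < pcN * pppN := by
    calc p * pcN + page < p * pcN + pcN := by omega
    _ = (p + 1) * pcN := by ring
    _ ≤ pppN * pcN := Nat.mul_le_mul_right _ (by omega)
    _ = pcN * pppN := Nat.mul_comm _ _
  -- LHS: A's element
  rw [hmod, hdiv]
  have hidxcast : ((p : Nat) : Int) * ((pcN : Nat) : Int) + ((page : Nat) : Int) = ((p * pcN + page : Nat) : Int) := by push_cast; ring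
  rw [hidxcast, PySem.List.pyGet?_natCast]
  -- RHS: the slice read at page
  have hslice : PySem.List.slice padded (some (((p : Nat) : Int) * ((pcN : Nat) : Int))) (some ((((p : Nat) : Int) + 1) * ((pcN : Nat) : Int)))
      = List.take ((p + 1) * pcN - p * pcN) (List.drop (p * pcN) padded) := by
    have h1 : ((p : Nat) : Int) * ((pcN : Nat) : Int) = ((p * pcN : Nat) : Int) := by push_cast; ring
    have h2 : (((p : Nat) : Int) + 1) * ((pcN : Nat) : Int) = (((p + 1) * pcN : Nat) : Int) := by push_cast; ring
    rw [h1, h2, PySem.List.slice_natCast]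
  rw [hslice, PySem.List.pyGet?_natCast]
  have htake : (p + 1) * pcN - p * pcN = pcN := by rw [Nat.succ_mul]; omega
  rw [htake, List.getElem?_take, List.getElem?_drop, if_pos hpage]
  have hpadget : padded[p * pcN + page]? = some (if h : p * pcN + page < n then some (input[p * pcN + page]'h) else none) := by
    rw [hpadded, hpadtoNat]
    exact padded_getElem? input (pcN * pppN) _ hidx
  rw [hpadget, Option.join]
  by_cases h : p * pcN + page < n
  · rw [if_pos (by omega : ((p * pcN + page : Nat) : Int) ≤ (n : Int) - 1), dif_pos h,
      List.getElem?_eq_getElem h]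
    rfl
  · rw [if_neg (by omega : ¬ ((p * pcN + page : Nat) : Int) ≤ (n : Int) - 1), dif_neg h]
    rfl

-- ===== VERDICT (by name: the statement is the Claim_ definition above) =====
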